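-- pv_equiv track=rewrite | github.com/paradigmxyz/cryo | crates/python/python/cryo_test/cryo_test/commands/command_parsing.py | get_commands_interface
-- ===== SOURCE A (Python) =====
-- import typing
--
-- def get_commands_interface(commands: dict[str, str]) -> str:
--     interfaces = set(
--         get_command_interface(command) for command in commands.values()
--     )
--     if len(interfaces) == 1:
--         return list(interfaces)[0]
--     else:
--         raise Exception()
--
-- def get_command_interface(command: str) -> typing.Literal['cli', 'python']:
--     if command.startswith('cryo.'):
--         return 'python'
--     else:
--         return 'cli'
-- ===== SOURCE B (Python) =====
-- def get_commands_interface(commands: dict[str, str]) -> str: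
--     values = iter(commands.values())
--     try:
--         first = next(values)
--     except StopIteration:
--         raise Exception()
--     reference = 'python' if first.startswith('cryo.') else 'cli'
--     for command in values:
--         interface = 'python' if command.startswith('cryo.') else 'cli'
--         if interface != reference:
--             raise Exception()
--     return reference
-- ===== Notes on version B (the rewrite author's own statement) =====
-- stated objective: alternative
-- what changed: B takes the first value's interface as a reference and scans the remaining values with an early exit on the first mismatch, instead of building a set of all interfaces and inspecting its cardinality.
import Mathlib
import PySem

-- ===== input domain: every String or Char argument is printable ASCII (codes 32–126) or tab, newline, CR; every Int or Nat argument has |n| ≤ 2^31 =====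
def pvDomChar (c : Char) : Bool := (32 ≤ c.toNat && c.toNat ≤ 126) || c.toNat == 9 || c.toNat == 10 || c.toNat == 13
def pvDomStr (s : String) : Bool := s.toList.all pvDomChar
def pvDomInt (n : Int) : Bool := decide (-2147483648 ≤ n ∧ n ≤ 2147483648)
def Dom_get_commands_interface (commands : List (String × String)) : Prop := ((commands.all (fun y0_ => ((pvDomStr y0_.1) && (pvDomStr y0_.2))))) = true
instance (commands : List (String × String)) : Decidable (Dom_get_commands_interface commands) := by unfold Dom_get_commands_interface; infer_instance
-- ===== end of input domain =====

-- B replaces A's set-cardinality check by a reference value and an early-exit scan (objective: alternative).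
-- ===== PORT A =====
def get_command_interface (command : String) : String :=
  if PySem.Str.startswith command "cryo." then "python" else "cli"

-- set(...) then len == 1 then list(...)[0]; the len != 1 branch raises (excluded by Pre_), modelled by "".
def get_commands_interface (commands : List (String × String)) : String :=
  let interfaces : PySem.Set String :=
    PySem.Set.ofList (((PySem.Dict.ofList commands).values).map get_command_interface)
  if interfaces.length = 1 then interfaces.headD "" else ""

-- ===== PORT B =====
-- early-exit scan against the reference; a mismatch raises in Python (excluded by Pre_), modelled by "".
def pvCheckRest (reference : String) : List String → String
  | [] => reference
  | c :: cs =>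
    if (if PySem.Str.startswith c "cryo." then "python" else "cli") = reference then
      pvCheckRest reference cs
    else ""

def get_commands_interface_alt (commands : List (String × String)) : String :=
  match (PySem.Dict.ofList commands).values with
  | [] => ""  -- next() raises StopIteration -> Exception (excluded by Pre_)
  | first :: rest =>
    pvCheckRest (if PySem.Str.startswith first "cryo." then "python" else "cli") rest

-- ===== PRECONDITION & SPEC =====
-- Pre_ admits exactly the inputs where A returns: the dict is nonempty and all of its values
-- have the same interface (all start with "cryo." or none does); otherwise A raises Exception().
def Pre_get_commands_interface (commands : List (String × String)) : Prop :=
  (PySem.Dict.ofList commands).values ≠ [] ∧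
    (((PySem.Dict.ofList commands).values).all (fun v => PySem.Str.startswith v "cryo.") ∨
     ((PySem.Dict.ofList commands).values).all (fun v => !PySem.Str.startswith v "cryo."))
instance (commands : List (String × String)) : Decidable (Pre_get_commands_interface commands) := by
  unfold Pre_get_commands_interface; infer_instance
def pvWitness_get_commands_interface : (List (String × String)) := [("tx", "cryo.transactions")]

def Spec_get_commands_interface (commands : List (String × String)) (out : String) : Prop := out = get_commands_interface_alt commands
instance (commands : List (String × String)) (out : String) : Decidable (Spec_get_commands_interface commands out) := by unfold Spec_get_commands_interface; infer_instance

-- ===== CLAIM (what is proved, stated in full; the proofs are below) =====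
def Claim_equal_get_commands_interface : Prop := ∀ (commands : List (String × String)), Dom_get_commands_interface commands → Pre_get_commands_interface commands → Spec_get_commands_interface commands (get_commands_interface commands)

-- ===== LEMMAS AND PROOFS =====
-- If every value has interface r, the B-side scan returns r.
theorem pvCheckRest_all (r : String) (vs : List String)
    (h : ∀ v ∈ vs, (if PySem.Str.startswith v "cryo." then "python" else "cli") = r) :
    pvCheckRest r vs = r := by
  induction vs with
  | nil => rfl
  | cons c cs ih =>
    simp only [pvCheckRest, h c (List.mem_cons_self ..), if_pos rfl]
    exact ih (fun v hv => h v (List.mem_cons_of_mem _ hv))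

-- Folding Set.add over copies of r onto the singleton [r] leaves [r].
theorem pvFoldl_add_replicate (r : String) (n : Nat) :
    List.foldl PySem.Set.add [r] (List.replicate n r) = [r] := by
  induction n with
  | zero => rfl
  | succ m ih => simpa [List.replicate_succ, List.foldl, PySem.Set.add] using ih

-- If every value has interface r, the A-side set of interfaces is exactly [r].
theorem pvSet_all (r : String) (vs : List String) (hne : vs ≠ [])
    (h : ∀ v ∈ vs, get_command_interface v = r) :
    PySem.Set.ofList (vs.map get_command_interface) = [r] := by
  have hmap : vs.map get_command_interface = List.replicate vs.length r := by
    rw [List.map_congr_left h, List.map_const']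
  rw [hmap]
  cases vs with
  | nil => exact absurd rfl hne
  | cons c cs =>
    simp only [List.length_cons, List.replicate_succ, PySem.Set.ofList, List.foldl]
    simpa [PySem.Set.add] using pvFoldl_add_replicate r cs.length

-- ===== VERDICT (by name: the statement is the Claim_ definition above) =====
theorem get_commands_interface_spec : Claim_equal_get_commands_interface := by
  intro commands _ hpre
  unfold Spec_get_commands_interface get_commands_interface get_commands_interface_alt
  obtain ⟨hne, hall⟩ := hpre
  cases hvs : (PySem.Dict.ofList commands).values with
  | nil => exact absurd hvs hne
  | cons first rest =>
    rw [hvs] at hall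
    set r := (if PySem.Str.startswith first "cryo." then "python" else "cli") with hr
    have hiface : ∀ v ∈ first :: rest,
        (if PySem.Str.startswith v "cryo." then "python" else "cli") = r := by
      intro v hv
      rcases hall with hall | hall
      · simp only [List.all_eq_true] at hall
        simp only [hr, hall v hv, hall first (List.mem_cons_self ..)]
      · simp only [List.all_eq_true, Bool.not_eq_eq_eq_not, Bool.not_true] at hall
        simp only [hr, hall v hv, hall first (List.mem_cons_self ..), Bool.false_eq_true, if_false]
    have hA : PySem.Set.ofList ((first :: rest).map get_command_interface) = [r] :=
      pvSet_all r _ (by simp) (fun v hv => by simpa [get_command_interface] using hiface v hv)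
    simp only [hA, List.length_cons, List.length_nil, List.headD, if_pos rfl]
    exact (pvCheckRest_all r rest (fun v hv => hiface v (List.mem_cons_of_mem _ hv))).symm
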